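-- pv_equiv track=rewrite | github.com/dalangzhonghangxing/RE | KnowledgeMatch.py | calScore
-- ===== SOURCE A (Python) =====
-- def calScore(k1, k2, baseScore):
--     same = 0
--     last = baseScore
--     for c1 in k1:
--         for c2 in k2:
--             if c1 == c2:
--                 same = same + last
--                 last = last * 2
--             else:
--                 last = baseScore
--     return same
-- ===== SOURCE B (Python) =====
-- def calScore(k1, k2, baseScore):
--     # run-length-encode k2 once, then a closed-form step per char of k1
--     m = len(k2)
--     runs = []
--     i = 0
--     while i < m:
--         j = i
--         while j < m and k2[j] == k2[i]:
--             j += 1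
--         runs.append((k2[i], j - i))
--         i = j
--     inner = {}
--     for (c, L) in runs[1:]:
--         inner[c] = inner.get(c, 0) + (1 << L) - 1
--     p = runs[0][1] if runs else 0          # leading run length
--     tLen = runs[-1][1] if runs else 0      # trailing run length
--     same = 0
--     last = baseScore
--     for c in k1:
--         f = p if m and c == k2[0] else 0
--         same += last * ((1 << f) - 1) + baseScore * inner.get(c, 0)
--         if m == 0:
--             pass
--         elif f == m:
--             last = last * (1 << m)
--         elif c == k2[m - 1]:
--             last = baseScore * (1 << tLen)
--         else:
--             last = baseScore
--     return same
-- ===== Notes on version B (the rewrite author's own statement) =====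
-- stated objective: alternative
-- what changed: B run-length-encodes k2 once into per-character geometric sums (leading run, trailing run, inner-run dict) and then does one closed-form step per character of k1, instead of re-scanning k2 for every character of k1.
import Mathlib
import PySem

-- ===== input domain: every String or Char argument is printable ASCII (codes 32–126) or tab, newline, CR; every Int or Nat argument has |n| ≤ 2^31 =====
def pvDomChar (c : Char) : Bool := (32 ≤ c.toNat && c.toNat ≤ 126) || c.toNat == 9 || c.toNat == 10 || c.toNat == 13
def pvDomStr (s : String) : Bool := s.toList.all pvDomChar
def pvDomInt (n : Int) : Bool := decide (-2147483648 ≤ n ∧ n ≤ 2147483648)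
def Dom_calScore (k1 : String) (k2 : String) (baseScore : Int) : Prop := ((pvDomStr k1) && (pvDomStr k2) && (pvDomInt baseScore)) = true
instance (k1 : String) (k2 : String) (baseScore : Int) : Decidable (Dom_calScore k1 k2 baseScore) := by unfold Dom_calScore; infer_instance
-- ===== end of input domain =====

-- B replaces A's rescan of k2 per character of k1 by a one-time run-length encoding of k2
-- with per-character geometric sums, then one closed-form step per character of k1.

-- ===== PORT A =====
def calScore (k1 : String) (k2 : String) (baseScore : Int) : Int :=
  (k1.toList.foldl (fun (st : Int × Int) c1 =>
      k2.toList.foldl (fun (st2 : Int × Int) c2 =>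
        if c1 == c2 then (st2.1 + st2.2, st2.2 * 2) else (st2.1, baseScore)) st)
    ((0 : Int), baseScore)).1

-- ===== PORT B =====
-- Source B's inner `while j < m and k2[j] == k2[i]`: split off the leading run of c
def pvRunTake (c : Char) : List Char → Nat × List Char
  | [] => (0, [])
  | x :: r => if x == c then ((pvRunTake c r).1 + 1, (pvRunTake c r).2) else (0, x :: r)

lemma pvRunTake_length (c : Char) : ∀ l : List Char, (pvRunTake c l).2.length ≤ l.length := by
  intro l
  induction l with
  | nil => simp [pvRunTake]
  | cons x r ih =>
    by_cases h : x == c <;> simp [pvRunTake, h] <;> omega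

-- Source B's outer run-length-encoding while loop
def pvRuns : List Char → List (Char × Nat)
  | [] => []
  | x :: r => (x, (pvRunTake x r).1 + 1) :: pvRuns (pvRunTake x r).2
termination_by l => l.length
decreasing_by
  simp only [List.length_cons]
  exact Nat.lt_succ_of_le (pvRunTake_length _ _)

def calScore_alt (k1 : String) (k2 : String) (baseScore : Int) : Int :=
  let l2 := k2.toList
  let m := l2.length
  let runs := pvRuns l2
  -- for (c, L) in runs[1:]: inner[c] = inner.get(c, 0) + (1 << L) - 1
  let inner : PySem.Dict Char Int :=
    (runs.drop 1).foldl (fun d p => d.insert p.1 (d.getD p.1 0 + (2 ^ p.2 - 1))) PySem.Dict.empty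
  let p := match runs.head? with | some r0 => r0.2 | none => 0        -- runs[0][1] if runs else 0
  let tLen := match runs.getLast? with | some rl => rl.2 | none => 0  -- runs[-1][1] if runs else 0
  (k1.toList.foldl (fun (st : Int × Int) c =>
      let f : Nat := if m ≠ 0 ∧ l2.head? = some c then p else 0       -- p if m and c == k2[0] else 0
      let same' := st.1 + st.2 * (2 ^ f - 1) + baseScore * inner.getD c 0
      let last' :=
        if m = 0 then st.2
        else if f = m then st.2 * 2 ^ m
        else if l2.getLast? = some c then baseScore * 2 ^ tLen        -- c == k2[m-1]
        else baseScore
      (same', last')) ((0 : Int), baseScore)).1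

-- ===== PRECONDITION & SPEC =====
def Spec_calScore (k1 : String) (k2 : String) (baseScore : Int) (out : Int) : Prop := out = calScore_alt k1 k2 baseScore
instance (k1 : String) (k2 : String) (baseScore : Int) (out : Int) : Decidable (Spec_calScore k1 k2 baseScore out) := by unfold Spec_calScore; infer_instance

-- ===== CLAIM (what is proved, stated in full; the proofs are below) =====
def Claim_equal_calScore : Prop := ∀ (k1 : String) (k2 : String) (baseScore : Int), Dom_calScore k1 k2 baseScore → Spec_calScore k1 k2 baseScore (calScore k1 k2 baseScore)

-- ===== LEMMAS AND PROOFS =====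

-- length of the leading run of c
def leadN (c : Char) : List Char → Nat
  | [] => 0
  | x :: r => if x = c then leadN c r + 1 else 0

-- sum of 2^L - 1 over all runs of c that do not start at position 0
def innS (c : Char) : List Char → Int
  | [] => 0
  | x :: r => if x = c then innS c r else innS c r + (2 ^ leadN c r - 1)

-- length of the trailing run of c
def tailN (c : Char) : List Char → Nat
  | [] => 0
  | x :: r => if x = c ∧ tailN c r = r.length then tailN c r + 1 else tailN c r

-- closed form of A's `last` after one pass of the inner loop over l
def lastC (c : Char) (l : List Char) (b last : Int) : Int :=
  if l = [] then last
  else if leadN c l = l.length then last * 2 ^ l.length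
  else if 0 < tailN c l then b * 2 ^ tailN c l
  else b

def runSum (c : Char) (L : List (Char × Nat)) : Int :=
  (L.map (fun p => if p.1 = c then (2 : Int) ^ p.2 - 1 else 0)).sum

lemma leadN_le (c : Char) : ∀ l : List Char, leadN c l ≤ l.length := by
  intro l; induction l with
  | nil => simp [leadN]
  | cons x r ih => simp only [leadN, List.length_cons]; split_ifs <;> omega

lemma tailN_le (c : Char) : ∀ l : List Char, tailN c l ≤ l.length := by
  intro l; induction l with
  | nil => simp [tailN]
  | cons x r ih => simp only [tailN, List.length_cons]; split_ifs <;> omega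

lemma lead_eq_len_iff (c : Char) (l : List Char) : leadN c l = l.length ↔ ∀ a ∈ l, a = c := by
  induction l with
  | nil => simp [leadN]
  | cons x r ih =>
    by_cases h : x = c
    · simp only [leadN, if_pos h, List.length_cons, List.mem_cons]
      constructor
      · intro hh a ha
        rcases ha with rfl | ha
        · exact h
        · exact ih.1 (by omega) a ha
      · intro hall
        have h2 : leadN c r = r.length := ih.2 (fun a ha => hall a (Or.inr ha))
        omega
    · have hle := leadN_le c r
      simp only [leadN, if_neg h, List.length_cons, List.mem_cons]
      constructor
      · intro hh; exact absurd hh.symm (by omega)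
      · intro hall; exact absurd (hall x (Or.inl rfl)) h

lemma tail_eq_len_iff (c : Char) (l : List Char) : tailN c l = l.length ↔ ∀ a ∈ l, a = c := by
  induction l with
  | nil => simp [tailN]
  | cons x r ih =>
    have hle := tailN_le c r
    by_cases h : x = c ∧ tailN c r = r.length
    · simp only [tailN, if_pos h, List.length_cons, List.mem_cons]
      constructor
      · intro _ a ha
        rcases ha with rfl | ha
        · exact h.1
        · exact ih.1 h.2 a ha
      · intro _; omega
    · simp only [tailN, if_neg h, List.length_cons, List.mem_cons]
      constructor
      · intro hh; exact absurd hh (by omega)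
      · intro hall
        exact absurd ⟨hall x (Or.inl rfl), ih.2 (fun a ha => hall a (Or.inr ha))⟩ h

lemma tailN_cons_ne (c x : Char) (r : List Char) (h : x ≠ c) : tailN c (x :: r) = tailN c r := by
  simp only [tailN]
  rw [if_neg (by tauto)]

lemma leadN_cons_ne (c x : Char) (r : List Char) (h : x ≠ c) : leadN c (x :: r) = 0 := by
  simp [leadN, h]

lemma tailN_pos_iff (c : Char) : ∀ l : List Char, 0 < tailN c l ↔ l.getLast? = some c := by
  intro l; induction l with
  | nil => simp [tailN]
  | cons x r ih =>
    cases r with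
    | nil =>
      by_cases h : x = c <;> simp [tailN, h]
    | cons y t =>
      rw [List.getLast?_cons_cons, ← ih]
      show (0 < if x = c ∧ tailN c (y :: t) = (y :: t).length then tailN c (y :: t) + 1 else tailN c (y :: t)) ↔ _
      split_ifs with h
      · have h2 := h.2
        simp only [List.length_cons] at h2
        omega
      · rfl

-- one inner pass of A, in closed form
lemma innerFold (b : Int) (c : Char) : ∀ (l : List Char) (same last : Int),
    l.foldl (fun (st2 : Int × Int) c2 =>
      if c == c2 then (st2.1 + st2.2, st2.2 * 2) else (st2.1, b)) (same, last)
    = (same + last * (2 ^ leadN c l - 1) + b * innS c l, lastC c l b last) := by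
  intro l
  induction l with
  | nil => intro same last; simp [leadN, innS, lastC]
  | cons x r ih =>
    intro same last
    by_cases hx : x = c
    · subst hx
      rw [List.foldl_cons, if_pos (by simp), ih]
      rw [Prod.mk.injEq]
      refine ⟨?_, ?_⟩
      · -- first components
        simp only [leadN, innS, eq_self_iff_true, if_true]
        rw [pow_succ]
        ring
      · -- lastC x (x::r) b last = lastC x r b (last*2)
        rcases Decidable.eq_or_ne r ([] : List Char) with hr | hr
        · subst hr; simp [lastC, leadN]
        · by_cases hall : leadN x r = r.length
          · have h1 : leadN x (x :: r) = (x :: r).length := by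
              simp only [leadN, eq_self_iff_true, if_true, List.length_cons, hall]
            simp only [lastC, if_neg (by simp : ¬(x :: r) = []), if_neg hr, if_pos hall, if_pos h1]
            simp [pow_succ]; ring
          · have h1 : leadN x (x :: r) ≠ (x :: r).length := by
              simp only [leadN, eq_self_iff_true, if_true, List.length_cons]; omega
            have h2 : tailN x r ≠ r.length := by
              intro hh; exact hall ((lead_eq_len_iff x r).2 ((tail_eq_len_iff x r).1 hh))
            have h3 : tailN x (x :: r) = tailN x r := by
              simp only [tailN]; rw [if_neg (by tauto)]
            simp only [lastC, if_neg (by simp : ¬(x :: r) = []), if_neg hr, if_neg hall, if_neg h1, h3]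
    · rw [List.foldl_cons, if_neg (by simp [beq_iff_eq]; exact fun h => hx h.symm), ih]
      rw [Prod.mk.injEq]
      refine ⟨?_, ?_⟩
      · simp only [leadN, innS, if_neg hx]
        ring
      · -- lastC c (x::r) b last = lastC c r b b
        rcases Decidable.eq_or_ne r ([] : List Char) with hr | hr
        · subst hr
          simp [lastC, leadN, tailN, hx]
        · have h1 : leadN c (x :: r) ≠ (x :: r).length := by
            rw [leadN_cons_ne c x r hx]; simp
          have h3 : tailN c (x :: r) = tailN c r := tailN_cons_ne c x r hx
          by_cases hall : leadN c r = r.length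
          · have htail : tailN c r = r.length := (tail_eq_len_iff c r).2 ((lead_eq_len_iff c r).1 hall)
            have hpos : 0 < tailN c r := by
              have : 0 < r.length := List.length_pos_iff.2 hr
              omega
            simp only [lastC, if_neg (by simp : ¬(x :: r) = []), if_neg hr, if_neg h1, if_pos hall, h3,
              if_pos hpos, htail]
            rw [if_pos (List.length_pos_iff.2 hr)]
          · simp only [lastC, if_neg (by simp : ¬(x :: r) = []), if_neg hr, if_neg h1, if_neg hall, h3]

lemma pvRunTake_spec (c : Char) : ∀ l : List Char, pvRunTake c l = (leadN c l, l.drop (leadN c l)) := by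
  intro l; induction l with
  | nil => simp [pvRunTake, leadN]
  | cons x r ih =>
    by_cases h : x = c
    · simp [pvRunTake, leadN, beq_iff_eq, h, ih]
    · simp [pvRunTake, leadN, beq_iff_eq, h]

lemma take_lead_replicate (c : Char) : ∀ l : List Char, l.take (leadN c l) = List.replicate (leadN c l) c := by
  intro l; induction l with
  | nil => simp [leadN]
  | cons x r ih =>
    by_cases h : x = c
    · simp [leadN, h, ih, List.replicate_succ]
    · simp [leadN, h]

lemma drop_lead_head (c : Char) : ∀ (l : List Char) (y : Char) (t : List Char),
    l.drop (leadN c l) = y :: t → y ≠ c := by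
  intro l
  induction l with
  | nil => intro y t h; simp [leadN] at h
  | cons x r ih =>
    intro y t h
    by_cases hx : x = c
    · simp only [leadN, if_pos hx, List.drop_succ_cons] at h
      exact ih y t h
    · simp only [leadN, if_neg hx, List.drop_zero] at h
      cases h
      exact hx

lemma drop_lead_head' (x : Char) (r : List Char) (y : Char) (t : List Char)
    (h : r.drop (leadN x r) = y :: t) : y ≠ x := by
  apply drop_lead_head x (x :: r) y t
  rw [show leadN x (x :: r) = leadN x r + 1 by simp [leadN], List.drop_succ_cons]
  exact h

-- tailN ignores any prefix when the suffix is not all-c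
lemma tailN_append_not_all (c : Char) (post : List Char) (hpost : ¬ ∀ a ∈ post, a = c) :
    ∀ pre : List Char, tailN c (pre ++ post) = tailN c post := by
  intro pre
  induction pre with
  | nil => simp
  | cons a pre ih =>
    have hlt : tailN c post < post.length := by
      have h1 := tailN_le c post
      have h2 : tailN c post ≠ post.length := fun hh => hpost ((tail_eq_len_iff c post).1 hh)
      omega
    have hlen : post.length ≤ (pre ++ post).length := by simp
    rw [List.cons_append]
    simp only [tailN, ih]
    rw [if_neg (by intro hh; omega)]

-- tailN ignores a prefix of characters ≠ c
lemma tailN_append_ne (c x : Char) (hx : x ≠ c) (post : List Char) :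
    ∀ pre : List Char, (∀ a ∈ pre, a = x) → tailN c (pre ++ post) = tailN c post := by
  intro pre
  induction pre with
  | nil => simp
  | cons a pre ih =>
    intro hall
    have ha : a = x := hall a (by simp)
    rw [List.cons_append, ha, tailN_cons_ne c x _ hx, ih (fun b hb => hall b (by simp [hb]))]

-- innS ignores a leading run (nonempty, all x) when the rest does not start with x
lemma innS_replicate_append (c x : Char) (post : List Char)
    (hpost : ∀ y t, post = y :: t → y ≠ x) :
    ∀ n : Nat, innS c (List.replicate (n + 1) x ++ post) = innS c post + (2 ^ leadN c post - 1) := by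
  intro n
  induction n with
  | zero =>
    by_cases hx : x = c
    · have hlead : leadN c post = 0 := by
        cases hp : post with
        | nil => simp [leadN]
        | cons y t => exact leadN_cons_ne c y t (fun hyc => (hpost y t hp) (hyc.trans hx.symm))
      simp [innS, List.replicate_succ, hx, hlead]
    · simp [innS, List.replicate_succ, hx]
  | succ n ih =>
    rw [List.replicate_succ, List.cons_append]
    by_cases hx : x = c
    · simp only [innS]
      rw [if_pos hx]
      exact ih
    · have hhead : leadN c (List.replicate (n + 1) x ++ post) = 0 := by
        rw [List.replicate_succ, List.cons_append]
        exact leadN_cons_ne c x _ hx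
      simp only [innS]
      rw [if_neg hx, hhead, ih]
      ring

lemma leadN_replicate_append (c : Char) (post : List Char)
    (hpost : ∀ y t, post = y :: t → y ≠ c) :
    ∀ n : Nat, leadN c (List.replicate n c ++ post) = n := by
  intro n
  induction n with
  | zero =>
    cases post with
    | nil => simp [leadN]
    | cons y t => simpa using leadN_cons_ne c y t (hpost y t rfl)
  | succ n ih => simp [List.replicate_succ, leadN, ih]

-- decompose l as leading run ++ rest, via pvRunTake
lemma lead_decomp (x : Char) (r : List Char) :
    x :: r = List.replicate (leadN x r + 1) x ++ r.drop (leadN x r) := by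
  rw [List.replicate_succ, List.cons_append]
  congr 1
  conv_lhs => rw [← List.take_append_drop (leadN x r) r]
  rw [take_lead_replicate]

lemma runSum_runs (c : Char) : ∀ l : List Char, runSum c (pvRuns l) = innS c l + (2 ^ leadN c l - 1) := by
  intro l
  induction l using pvRuns.induct with
  | case1 => simp [pvRuns, runSum, innS, leadN]
  | case2 x r ih =>
    rw [pvRuns, pvRunTake_spec]
    rw [pvRunTake_spec] at ih
    simp only at ih ⊢
    set n0 := leadN x r with hn0
    set r' := r.drop (leadN x r) with hr'
    have hhead : ∀ y t, r' = y :: t → y ≠ x := fun y t hh => drop_lead_head' x r y t hh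
    have hdecomp : x :: r = List.replicate (n0 + 1) x ++ r' := lead_decomp x r
    have hinn : innS c (x :: r) = innS c r' + (2 ^ leadN c r' - 1) := by
      rw [hdecomp]; exact innS_replicate_append c x r' hhead n0
    simp only [runSum, List.map_cons, List.sum_cons] at ih ⊢
    rw [ih, hinn]
    by_cases hx : x = c
    · have hpost' : ∀ y t, r' = y :: t → y ≠ c := fun y t hh hyc => hhead y t hh (hyc.trans hx.symm)
      have hl : leadN c r' = 0 := by
        cases hr : r' with
        | nil => simp [leadN]
        | cons y t => exact leadN_cons_ne c y t (hpost' y t hr)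
      have hlead : leadN c (x :: r) = n0 + 1 := by
        rw [hx] at hdecomp
        rw [hx, hdecomp]
        exact leadN_replicate_append c r' hpost' (n0 + 1)
      rw [if_pos hx, hlead, hl]
      ring
    · have hlead : leadN c (x :: r) = 0 := leadN_cons_ne c x r hx
      rw [if_neg hx, hlead]
      ring

lemma dictFold_getD (c : Char) : ∀ (L : List (Char × Nat)) (d : PySem.Dict Char Int),
    (L.foldl (fun d p => d.insert p.1 (d.getD p.1 0 + (2 ^ p.2 - 1))) d).getD c 0
    = d.getD c 0 + runSum c L := by
  intro L
  induction L with
  | nil => intro d; simp [runSum]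
  | cons p L ih =>
    intro d
    rw [List.foldl_cons, ih]
    rw [PySem.Dict.getD_insert]
    simp only [runSum, List.map_cons, List.sum_cons]
    by_cases h : c = p.1
    · rw [if_pos h, h, if_pos rfl]; ring
    · rw [if_neg h, if_neg (fun hh => h hh.symm)]
      ring

lemma innS_drop (c : Char) (l : List Char) : runSum c ((pvRuns l).drop 1) = innS c l := by
  cases l with
  | nil => simp [pvRuns, runSum, innS]
  | cons x r =>
    rw [pvRuns, pvRunTake_spec]
    simp only [List.drop_succ_cons, List.drop_zero]
    set r' := r.drop (leadN x r) with hr'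
    have hhead : ∀ y t, r' = y :: t → y ≠ x := fun y t h => drop_lead_head' x r y t h
    have hdecomp : x :: r = List.replicate (leadN x r + 1) x ++ r' := lead_decomp x r
    rw [runSum_runs c r']
    rw [hdecomp]
    exact (innS_replicate_append c x r' hhead (leadN x r)).symm

lemma runs_getLast (l : List Char) (h : l ≠ []) :
    ∃ cl : Char, l.getLast? = some cl ∧ (pvRuns l).getLast? = some (cl, tailN cl l) := by
  induction l using pvRuns.induct with
  | case1 => exact absurd rfl h
  | case2 x r ih =>
    rw [pvRuns, pvRunTake_spec]
    rw [pvRunTake_spec] at ih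
    simp only at ih ⊢
    set n0 := leadN x r with hn0
    set r' := r.drop (leadN x r) with hr'
    have hhead : ∀ y t, r' = y :: t → y ≠ x := fun y t hh => drop_lead_head' x r y t hh
    have hdecomp : x :: r = List.replicate (n0 + 1) x ++ r' := lead_decomp x r
    cases hr : r' with
    | nil =>
      have hall : x :: r = List.replicate (n0 + 1) x := by rw [hdecomp, hr, List.append_nil]
      refine ⟨x, ?_, ?_⟩
      · rw [hall, List.replicate_succ', List.getLast?_append_of_ne_nil _ (by simp)]
        simp
      · have htail : tailN x (x :: r) = (x :: r).length := by
          rw [tail_eq_len_iff]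
          intro a ha
          rw [hall] at ha
          exact List.eq_of_mem_replicate ha
        have hlen : (x :: r).length = n0 + 1 := by
          rw [hall, List.length_replicate]
        simp [pvRuns, htail, hlen]
    | cons y t =>
      rw [← hr]
      have hne : r' ≠ [] := by rw [hr]; simp
      obtain ⟨cl, hcl1, hcl2⟩ := ih hne
      refine ⟨cl, ?_, ?_⟩
      · rw [hdecomp, List.getLast?_append_of_ne_nil _ hne, hcl1]
      · have hruns_ne : pvRuns r' ≠ [] := by rw [hr, pvRuns]; simp
        have hlast : ((x, n0 + 1) :: pvRuns r').getLast? = (pvRuns r').getLast? := by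
          cases hpp : pvRuns r' with
          | nil => exact absurd hpp hruns_ne
          | cons a L => rw [List.getLast?_cons_cons]
        rw [hlast, hcl2]
        have htl : tailN cl (x :: r) = tailN cl r' := by
          rw [hdecomp]
          by_cases hall2 : ∀ a ∈ r', a = cl
          · have hycl : y = cl := hall2 y (by rw [hr]; simp)
            have hxcl : x ≠ cl := fun hxeq => (hhead y t hr) (hycl.trans hxeq.symm)
            exact tailN_append_ne cl x hxcl r' (List.replicate (n0 + 1) x)
              (fun a ha => List.eq_of_mem_replicate ha)
          · exact tailN_append_not_all cl r' hall2 (List.replicate (n0 + 1) x)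
        rw [htl]

-- B's precomputed pieces agree with the spec functions
lemma dictB_eq (c : Char) (l2 : List Char) :
    ((((pvRuns l2).drop 1).foldl (fun d p => d.insert p.1 (d.getD p.1 0 + (2 ^ p.2 - 1)))
      (PySem.Dict.empty : PySem.Dict Char Int)).getD c 0) = innS c l2 := by
  rw [dictFold_getD, PySem.Dict.getD_empty, innS_drop]
  ring

lemma headRun_eq (c : Char) (l2 : List Char) :
    (if l2.length ≠ 0 ∧ l2.head? = some c then
        (match (pvRuns l2).head? with | some r0 => r0.2 | none => 0) else 0) = leadN c l2 := by
  cases l2 with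
  | nil => simp [leadN]
  | cons x r =>
    rw [pvRuns, pvRunTake_spec]
    simp only [List.head?_cons, List.length_cons, List.head?_cons]
    by_cases hc : x = c
    · rw [if_pos ⟨by omega, by rw [hc]⟩]
      simp [leadN, hc]
    · rw [if_neg (by rintro ⟨-, hh⟩; exact hc (by injection hh))]
      exact (leadN_cons_ne c x r hc).symm

lemma lastB_eq (c : Char) (l2 : List Char) (b t : Int) :
    (if l2.length = 0 then t
     else if leadN c l2 = l2.length then t * 2 ^ l2.length
     else if l2.getLast? = some c then
        b * 2 ^ (match (pvRuns l2).getLast? with | some rl => rl.2 | none => 0)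
     else b) = lastC c l2 b t := by
  rcases Decidable.eq_or_ne l2 ([] : List Char) with h0 | h0
  · subst h0; simp [lastC]
  · rw [if_neg (by simpa [List.length_eq_zero_iff] using h0)]
    rw [lastC, if_neg h0]
    by_cases hl : leadN c l2 = l2.length
    · rw [if_pos hl, if_pos hl]
    · rw [if_neg hl, if_neg hl]
      by_cases hg : l2.getLast? = some c
      · obtain ⟨cl, hcl1, hcl2⟩ := runs_getLast l2 h0
        have hclc : cl = c := by rw [hcl1] at hg; injection hg
        subst hclc
        rw [if_pos hg, hcl2]
        have hpos : 0 < tailN cl l2 := (tailN_pos_iff cl l2).2 hg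
        rw [if_pos hpos]
      · rw [if_neg hg]
        have hnp : ¬ 0 < tailN c l2 := fun hp => hg ((tailN_pos_iff c l2).1 hp)
        rw [if_neg hnp]

-- ===== VERDICT (by name: the statement is the Claim_ definition above) =====
theorem calScore_spec : Claim_equal_calScore := by
  intro k1 k2 b _
  unfold Spec_calScore calScore calScore_alt
  simp only
  congr 1
  refine List.foldl_ext _ _ _ ?_
  intro st c _
  obtain ⟨s, t⟩ := st
  rw [innerFold]
  rw [Prod.mk.injEq]
  refine ⟨?_, ?_⟩
  · rw [dictB_eq, headRun_eq]
  · rw [headRun_eq, lastB_eq]
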